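-- pv_equiv track=rewrite | github.com/Scoz9/OrderCorrespondence | main.py | categorize_orders
-- ===== SOURCE A (Python) =====
-- def categorize_orders(listOrders):
--     singleProducts = []
--     multiProducts = []
--     ordersMultiProduct = []
--
--     for order in listOrders:
--         if len(order) > 1:
--             ordersMultiProduct.append(order)
--         elif order[0][2] != "1":
--             multiProducts.append(order)
--         else:
--             singleProducts.append(order)
--
--     return singleProducts, multiProducts, ordersMultiProduct
-- ===== SOURCE B (Python) =====
-- def _partition(xs, pred):
--     yes, no = [], []
--     for x in xs:
--         (yes if pred(x) else no).append(x)
--     return yes, no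
--
--
-- def categorize_orders(listOrders):
--     singles, ordersMultiProduct = _partition(listOrders, lambda o: len(o) <= 1)
--     singleProducts, multiProducts = _partition(singles, lambda o: o[0][2] == "1")
--     return singleProducts, multiProducts, ordersMultiProduct
-- ===== Notes on version B (the rewrite author's own statement) =====
-- stated objective: simpler
-- what changed: Replaces the single three-way branching loop by two nested binary partitions: first split orders by size, then split the single-line orders by whether the third character of the first field is '1'.
import Mathlib
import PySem

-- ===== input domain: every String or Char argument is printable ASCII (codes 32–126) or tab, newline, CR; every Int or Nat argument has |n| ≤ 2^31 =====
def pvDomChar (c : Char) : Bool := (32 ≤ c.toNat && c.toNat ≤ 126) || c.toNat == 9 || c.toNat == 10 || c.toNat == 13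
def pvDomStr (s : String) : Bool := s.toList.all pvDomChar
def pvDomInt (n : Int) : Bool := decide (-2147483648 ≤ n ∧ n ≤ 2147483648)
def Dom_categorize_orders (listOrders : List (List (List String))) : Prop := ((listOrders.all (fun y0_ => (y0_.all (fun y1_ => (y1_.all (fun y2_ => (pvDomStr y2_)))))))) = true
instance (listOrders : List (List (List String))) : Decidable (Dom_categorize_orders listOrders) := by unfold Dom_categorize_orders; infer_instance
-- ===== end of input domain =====

-- B replaces A's single three-way branching loop by two nested binary partitions (same cost, simpler decomposition).

-- the shared branch test  order[0][2] == "1" : inside Pre_ the order is nonempty and its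
-- first line has ≥ 3 fields, so the headD/getD defaults are never consulted there.
def pvIsOne (o : List (List String)) : Bool :=
  (o.headD []).getD 2 "" == "1"

-- ===== PORT A =====
-- one pass, three accumulators, branches in Python's order
def categorize_orders (listOrders : List (List (List String))) : List (List (List String)) × List (List (List String)) × List (List (List String)) :=
  listOrders.foldl
    (fun acc order =>
      if 1 < order.length then (acc.1, acc.2.1, acc.2.2 ++ [order])
      else if pvIsOne order = false then (acc.1, acc.2.1 ++ [order], acc.2.2)
      else (acc.1 ++ [order], acc.2.1, acc.2.2))
    ([], [], [])

-- ===== PORT B =====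
-- _partition in Source B is List.partition
def categorize_orders_alt (listOrders : List (List (List String))) : List (List (List String)) × List (List (List String)) × List (List (List String)) :=
  let p := listOrders.partition (fun o => o.length ≤ 1)
  let q := p.1.partition (fun o => pvIsOne o)
  (q.1, q.2, p.2)

-- ===== PRECONDITION & SPEC =====
-- Pre_ excludes exactly the inputs where Python A raises IndexError: an order with at most one
-- line that is empty or whose first line has fewer than 3 fields.
def Pre_categorize_orders (listOrders : List (List (List String))) : Prop :=
  ∀ o ∈ listOrders, o.length ≤ 1 → o.length = 1 ∧ 3 ≤ (o.headD []).length
instance (listOrders : List (List (List String))) : Decidable (Pre_categorize_orders listOrders) := by unfold Pre_categorize_orders; infer_instance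

def pvWitness_categorize_orders : List (List (List String)) :=
  [[["a", "b", "1"]], [["x", "y", "z"]], [["a"], ["b"]]]

def Spec_categorize_orders (listOrders : List (List (List String))) (out : List (List (List String)) × List (List (List String)) × List (List (List String))) : Prop := out = categorize_orders_alt listOrders
instance (listOrders : List (List (List String))) (out : List (List (List String)) × List (List (List String)) × List (List (List String))) : Decidable (Spec_categorize_orders listOrders out) := by unfold Spec_categorize_orders; infer_instance

-- ===== CLAIM (what is proved, stated in full; the proofs are below) =====
def Claim_equal_categorize_orders : Prop := ∀ (listOrders : List (List (List String))), Dom_categorize_orders listOrders → Pre_categorize_orders listOrders → Spec_categorize_orders listOrders (categorize_orders listOrders)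

-- ===== LEMMAS AND PROOFS =====

-- how B's nested partition unfolds on a cons
theorem categorize_orders_alt_cons (o : List (List String)) (t : List (List (List String))) :
    categorize_orders_alt (o :: t) =
      if o.length ≤ 1 then
        if pvIsOne o then
          (o :: (categorize_orders_alt t).1, (categorize_orders_alt t).2.1, (categorize_orders_alt t).2.2)
        else
          ((categorize_orders_alt t).1, o :: (categorize_orders_alt t).2.1, (categorize_orders_alt t).2.2)
      else ((categorize_orders_alt t).1, (categorize_orders_alt t).2.1, o :: (categorize_orders_alt t).2.2) := by
  by_cases h1 : o.length ≤ 1 <;> by_cases h2 : pvIsOne o <;>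
    simp [categorize_orders_alt, List.partition_eq_filter_filter, h1, h2]

-- A's fold with general accumulators appends the three components B computes.
theorem categorize_orders_foldl (l : List (List (List String))) (s m om : List (List (List String))) :
    l.foldl
      (fun acc order =>
        if 1 < order.length then (acc.1, acc.2.1, acc.2.2 ++ [order])
        else if pvIsOne order = false then (acc.1, acc.2.1 ++ [order], acc.2.2)
        else (acc.1 ++ [order], acc.2.1, acc.2.2))
      (s, m, om)
    = (s ++ (categorize_orders_alt l).1, m ++ (categorize_orders_alt l).2.1, om ++ (categorize_orders_alt l).2.2) := by
  induction l generalizing s m om with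
  | nil => simp [categorize_orders_alt]
  | cons o t ih =>
      rw [List.foldl_cons, categorize_orders_alt_cons]
      by_cases h1 : 1 < o.length
      · rw [if_pos h1, ih, if_neg (by omega)]; simp
      · have h1' : o.length ≤ 1 := by omega
        rw [if_neg h1, if_pos h1']
        by_cases h2 : pvIsOne o
        · rw [if_neg (by simp [h2]), ih, if_pos h2]; simp
        · rw [if_pos (by simp [h2]), ih, if_neg h2]; simp

-- ===== VERDICT (by name: the statement is the Claim_ definition above) =====
theorem categorize_orders_spec : Claim_equal_categorize_orders := by
  intro l _ _
  show categorize_orders l = categorize_orders_alt l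
  rw [categorize_orders, categorize_orders_foldl]
  simp
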